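-- pv_equiv track=rewrite | github.com/meerk40t/meerk40t | .github/workflows/translate-error-check.py | are_curly_brackets_matched
-- ===== SOURCE A (Python) =====
-- def are_curly_brackets_matched(input_str):
--     stack = []
--     escaped = False
--     for char in input_str:
--         if char == "\\":
--             escaped = True
--             continue
--         if escaped:
--             escaped = False
--             continue
--         if char == "{":
--             stack.append("{")
--         elif char == "}":
--             if not stack:
--                 return False
--             stack.pop()
--     return not stack
-- ===== SOURCE B (Python) =====
-- def are_curly_brackets_matched(input_str):
--     # Pass 1: strip escapes -- drop each run of backslashes together with the
--     # one character it escapes (a backslash run escapes the next character).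
--     out = []
--     i = 0
--     n = len(input_str)
--     while i < n:
--         if input_str[i] == "\\":
--             while i < n and input_str[i] == "\\":
--                 i += 1
--             i += 1  # skip the escaped character (if any)
--         else:
--             out.append(input_str[i])
--             i += 1
--     # Pass 2: bracket balance with an integer depth counter, no stack.
--     depth = 0
--     for ch in out:
--         if ch == "{":
--             depth += 1
--         elif ch == "}":
--             depth -= 1
--             if depth < 0:
--                 return False
--     return depth == 0
-- ===== Notes on version B (the rewrite author's own statement) =====
-- stated objective: alternative
-- what changed: Replaced A's single interleaved escape-and-match loop with explicit stack and escaped flag by a two-pass decomposition: first strip each backslash run plus its escaped character, then a separate balance pass with an integer depth counter (no stack).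
import Mathlib
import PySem

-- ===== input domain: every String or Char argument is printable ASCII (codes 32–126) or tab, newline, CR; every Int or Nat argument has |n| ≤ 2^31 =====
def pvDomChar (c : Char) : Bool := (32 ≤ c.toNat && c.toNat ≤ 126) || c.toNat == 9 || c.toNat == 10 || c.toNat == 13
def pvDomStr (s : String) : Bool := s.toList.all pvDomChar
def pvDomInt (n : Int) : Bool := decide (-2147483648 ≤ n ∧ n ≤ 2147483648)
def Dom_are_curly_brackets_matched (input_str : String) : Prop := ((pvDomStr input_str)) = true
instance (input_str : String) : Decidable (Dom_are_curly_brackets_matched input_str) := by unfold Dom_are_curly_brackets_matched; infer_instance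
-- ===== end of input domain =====

-- B replaces A's interleaved escape-and-match loop (stack + escaped flag) by a
-- strip-escapes pass followed by a depth-counter balance pass; same O(n) cost.

-- ===== PORT A =====
-- A's loop: stack of '{' (append/pop at the end), escaped flag; transliterated
-- as structural recursion over the characters with the same state.
def pvAStack : List Char → List Char → Bool → Bool
  | [], stack, _ => stack.isEmpty
  | c :: rest, stack, escaped =>
    if c = '\\' then pvAStack rest stack true
    else if escaped then pvAStack rest stack false
    else if c = '{' then pvAStack rest (stack ++ ['{']) escaped
    else if c = '}' then
      if stack.isEmpty then false else pvAStack rest stack.dropLast escaped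
    else pvAStack rest stack escaped

def are_curly_brackets_matched (input_str : String) : Bool :=
  pvAStack input_str.toList [] false

-- ===== PORT B =====
-- Source B's inner while loop: skip a run of backslashes, then one more character.
def pvDropEsc : List Char → List Char
  | [] => []
  | c :: rest => if c = '\\' then pvDropEsc rest else rest

theorem pvDropEsc_length_le (l : List Char) : (pvDropEsc l).length ≤ l.length := by
  induction l with
  | nil => simp [pvDropEsc]
  | cons c rest ih =>
    simp only [pvDropEsc]
    split
    · exact Nat.le_trans ih (Nat.le_succ _)
    · exact Nat.le_succ _

-- Source B's pass 1 (while loop over indices, here over the remaining characters):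
-- copy ordinary characters, drop each backslash run together with the next char.
def pvStrip : List Char → List Char
  | [] => []
  | c :: rest =>
    if c = '\\' then pvStrip (pvDropEsc rest) else c :: pvStrip rest
termination_by l => l.length
decreasing_by
  · exact Nat.lt_succ_of_le (pvDropEsc_length_le rest)
  · simp

-- Source B's pass 2: integer depth counter, early False when it goes negative.
def pvDepth : List Char → Int → Bool
  | [], depth => depth == 0
  | c :: rest, depth =>
    if c = '{' then pvDepth rest (depth + 1)
    else if c = '}' then
      if depth - 1 < 0 then false else pvDepth rest (depth - 1)
    else pvDepth rest depth

def are_curly_brackets_matched_alt (input_str : String) : Bool :=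
  pvDepth (pvStrip input_str.toList) 0

-- ===== PRECONDITION & SPEC =====
def Spec_are_curly_brackets_matched (input_str : String) (out : Bool) : Prop := out = are_curly_brackets_matched_alt input_str
instance (input_str : String) (out : Bool) : Decidable (Spec_are_curly_brackets_matched input_str out) := by unfold Spec_are_curly_brackets_matched; infer_instance

-- ===== CLAIM (what is proved, stated in full; the proofs are below) =====
def Claim_equal_are_curly_brackets_matched : Prop := ∀ (input_str : String), Dom_are_curly_brackets_matched input_str → Spec_are_curly_brackets_matched input_str (are_curly_brackets_matched input_str)

-- ===== LEMMAS AND PROOFS =====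

-- In A, an active escape flag skips any further backslashes and then one
-- ordinary character: exactly what pvDropEsc removes.
theorem pvAStack_esc (r : List Char) (st : List Char) :
    pvAStack r st true = pvAStack (pvDropEsc r) st false := by
  induction r generalizing st with
  | nil => simp [pvAStack, pvDropEsc]
  | cons c rest ih =>
    by_cases h : c = '\\'
    · simp [pvAStack, pvDropEsc, h, ih]
    · simp [pvAStack, pvDropEsc, h]

-- Main invariant: A's loop from any stack equals B's depth pass on the
-- stripped remainder started at the stack's length.
theorem pvMain (cs : List Char) (st : List Char) :
    pvAStack cs st false = pvDepth (pvStrip cs) (st.length : Int) := by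
  match cs with
  | [] =>
    cases st <;> simp [pvAStack, pvStrip, pvDepth] <;> omega
  | c :: rest =>
    by_cases hb : c = '\\'
    · rw [show pvAStack (c :: rest) st false = pvAStack rest st true by
        simp [pvAStack, hb]]
      rw [pvAStack_esc, pvMain (pvDropEsc rest) st]
      simp [pvStrip, hb]
    · by_cases ho : c = '{'
      · rw [show pvAStack (c :: rest) st false
            = pvAStack rest (st ++ ['{']) false by simp [pvAStack, ho]]
        rw [pvMain rest (st ++ ['{'])]
        simp [pvStrip, pvDepth, ho]
      · by_cases hc : c = '}'
        · rw [show pvAStack (c :: rest) st false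
              = if st.isEmpty then false else pvAStack rest st.dropLast false by
              simp [pvAStack, hc]]
          cases st with
          | nil => simp [pvStrip, pvDepth, hc]
          | cons a t =>
            rw [if_neg (by simp)]
            rw [pvMain rest (a :: t).dropLast]
            have hlen : (a :: t).dropLast.length = t.length := by
              simp [List.length_dropLast]
            simp only [pvStrip, if_neg hb, pvDepth, if_neg (by simp [ho] : ¬ c = '{'), if_pos hc, hlen]
            rw [if_neg (by simp only [List.length_cons]; push_cast; omega)]
            congr 1
            simp only [List.length_cons]
            push_cast
            omega
        · rw [show pvAStack (c :: rest) st false = pvAStack rest st false by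
            simp [pvAStack, hb, ho, hc]]
          rw [pvMain rest st]
          simp [pvStrip, pvDepth, hb, ho, hc]
termination_by cs.length
decreasing_by
  · exact Nat.lt_succ_of_le (pvDropEsc_length_le rest)
  all_goals simp

-- ===== VERDICT (by name: the statement is the Claim_ definition above) =====
theorem are_curly_brackets_matched_spec : Claim_equal_are_curly_brackets_matched := by
  intro s _
  unfold Spec_are_curly_brackets_matched are_curly_brackets_matched are_curly_brackets_matched_alt
  simpa using pvMain s.toList []
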